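-- pv_equiv track=rewrite | github.com/DiziASP/Tubes-Daspro---BNMO | Code/base.py | spliter
-- ===== SOURCE A (Python) =====
-- def spliter(line, delimiter):
--     arr = []
--     tmp = ''
--     for c in line:
--         if c == delimiter:
--             arr.append(tmp)
--             tmp = ''
--         elif c == "\n":
--             break
--         else:
--             tmp += c
--     return arr
-- ===== SOURCE B (Python) =====
-- def spliter(line, delimiter):
--     # Different decomposition: fix the scan boundary first (first newline,
--     # unless the delimiter itself is a newline), then collect the delimiter
--     # positions inside it and cut the line into slices between them; the
--     # trailing piece after the last delimiter is never emitted, like A.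
--     if delimiter == '\n':
--         end = len(line)
--     else:
--         end = next((i for i, c in enumerate(line) if c == '\n'), len(line))
--     positions = [i for i in range(end) if line[i] == delimiter]
--     out = []
--     prev = 0
--     for p in positions:
--         out.append(line[prev:p])
--         prev = p + 1
--     return out
-- ===== Notes on version B (the rewrite author's own statement) =====
-- stated objective: alternative
-- what changed: Replaces A's single char-by-char scan with accumulator/break by a boundary-then-slice decomposition: compute the scan end (first newline unless the delimiter is a newline), collect delimiter positions before it, and emit the slices between consecutive positions, never materialising the trailing field.
import Mathlib
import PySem

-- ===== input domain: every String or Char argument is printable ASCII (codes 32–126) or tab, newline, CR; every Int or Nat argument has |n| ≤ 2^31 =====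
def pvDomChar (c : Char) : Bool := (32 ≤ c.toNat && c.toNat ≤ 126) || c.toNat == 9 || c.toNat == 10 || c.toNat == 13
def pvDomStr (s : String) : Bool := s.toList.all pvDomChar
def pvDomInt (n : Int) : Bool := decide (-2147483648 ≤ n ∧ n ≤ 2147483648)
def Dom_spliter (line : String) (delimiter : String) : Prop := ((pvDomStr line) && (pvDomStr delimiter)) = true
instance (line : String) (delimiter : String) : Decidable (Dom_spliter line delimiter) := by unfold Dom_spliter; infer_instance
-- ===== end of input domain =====

-- ===== PORT A =====
-- A builds fields char by char: append the field on delimiter, stop at newline.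
def spliterGo (delimiter : String) : List Char → List Char → List String → List String
  | [], _tmp, arr => arr
  | c :: cs, tmp, arr =>
    if String.ofList [c] = delimiter then spliterGo delimiter cs [] (arr ++ [String.ofList tmp])
    else if c = '\n' then arr
    else spliterGo delimiter cs (tmp ++ [c]) arr

def spliter (line : String) (delimiter : String) : List String :=
  spliterGo delimiter line.toList [] []

-- ===== PORT B =====
-- B (see Source B): boundary first, then delimiter positions, then slices between them.
def spliter_alt (line : String) (delimiter : String) : List String :=
  let e : Int := if delimiter = "\n" then (line.toList.length : Int)
    else (((line.toList.findIdx? (fun c => c == '\n')).getD line.toList.length : Nat) : Int)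
  let positions : List Int := (PySem.List.pyRange 0 e 1).filter
      (fun i => (PySem.Str.pyGet? line i).map (fun c => String.ofList [c]) == some delimiter)
  (positions.foldl
      (fun (st : List String × Int) p =>
        (st.1 ++ [PySem.Str.slice line (some st.2) (some p)], p + 1))
      ([], 0)).1

-- ===== PRECONDITION & SPEC =====
def Spec_spliter (line : String) (delimiter : String) (out : List String) : Prop := out = spliter_alt line delimiter
instance (line : String) (delimiter : String) (out : List String) : Decidable (Spec_spliter line delimiter out) := by unfold Spec_spliter; infer_instance

-- ===== CLAIM (what is proved, stated in full; the proofs are below) =====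
def Claim_equal_spliter : Prop := ∀ (line : String) (delimiter : String), Dom_spliter line delimiter → Spec_spliter line delimiter (spliter line delimiter)

-- ===== LEMMAS AND PROOFS =====

-- the fields A emits, as a recursion over the already-truncated character region
def segs (d : String) (acc : List Char) : List Char → List String
  | [] => []
  | c :: cs => if String.ofList [c] = d then String.ofList acc :: segs d [] cs
               else segs d (acc ++ [c]) cs

theorem spliterGo_ne_newline (delimiter : String) (hd : delimiter ≠ "\n")
    (cs : List Char) : ∀ (tmp : List Char) (arr : List String),
    spliterGo delimiter cs tmp arr = arr ++ segs delimiter tmp (cs.takeWhile (fun c => !(c == '\n'))) := by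
  induction cs with
  | nil => intro tmp arr; simp [spliterGo, segs]
  | cons c cs ih =>
    intro tmp arr
    by_cases hc : c = '\n'
    · subst hc
      have h1 : String.ofList ['\n'] ≠ delimiter := by
        intro h; exact hd (by rw [← h])
      simp [spliterGo, h1, segs]
    · by_cases h2 : String.ofList [c] = delimiter
      · simp only [spliterGo, if_pos h2, List.takeWhile_cons, hc, ih]
        simp [segs, h2, hc]
      · simp only [spliterGo, if_neg h2, if_neg hc, List.takeWhile_cons, ih]
        simp [segs, h2, hc]

theorem spliterGo_newline (cs : List Char) : ∀ (tmp : List Char) (arr : List String),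
    spliterGo "\n" cs tmp arr = arr ++ segs "\n" tmp cs := by
  induction cs with
  | nil => intro tmp arr; simp [spliterGo, segs]
  | cons c cs ih =>
    intro tmp arr
    by_cases h2 : String.ofList [c] = "\n"
    · simp [spliterGo, h2, ih, segs]
    · have hc : c ≠ '\n' := by
        intro h; subst h; exact h2 rfl
      simp [spliterGo, h2, hc, ih, segs]

theorem takeWhile_eq_take_findIdx? (cs : List Char) :
    cs.takeWhile (fun c => !(c == '\n')) = cs.take ((cs.findIdx? (fun c => c == '\n')).getD cs.length) := by
  induction cs with
  | nil => simp
  | cons c cs ih =>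
    rw [List.takeWhile_cons, List.findIdx?_cons]
    by_cases hc : c = '\n'
    · simp [hc]
    · have hcb : (c == '\n') = false := by simp [hc]
      rw [hcb]
      cases h : cs.findIdx? (fun c => c == '\n') with
      | none =>
        rw [h] at ih
        simp only [Option.getD_none, List.take_length] at ih
        simp [ih]
      | some i =>
        rw [h] at ih
        simp only [Option.getD_some] at ih
        simp [ih]

-- the heart: folding the slice-step over the delimiter positions in [prev, e)
-- produces exactly the fields of `segs` over the region, with the pending field
-- accumulated since index s.
theorem foldl_positions (line delimiter : String) (e : Int)
    (he : e ≤ (line.toList.length : Int)) :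
    ∀ (k : Nat) (prev s : Int) (out : List String), (e - prev).toNat = k →
    0 ≤ s → s ≤ prev → prev ≤ e →
    (((PySem.List.pyRange prev e 1).filter
        (fun i => (PySem.Str.pyGet? line i).map (fun c => String.ofList [c]) == some delimiter)).foldl
      (fun (st : List String × Int) p =>
        (st.1 ++ [PySem.Str.slice line (some st.2) (some p)], p + 1)) (out, s)).1
    = out ++ segs delimiter ((line.toList.drop s.toNat).take (prev - s).toNat)
              ((line.toList.drop prev.toNat).take (e - prev).toNat) := by
  intro k
  induction k with
  | zero =>
    intro prev s out hk _ _ hpe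
    have hep : e ≤ prev := by omega
    rw [PySem.List.pyRange_one_eq_nil hep]
    simp [hk, segs]
  | succ k ih =>
    intro prev s out hk hs hsp hpe
    have hlt : prev < e := by omega
    have hprevlen : prev.toNat < line.toList.length := by omega
    have hdrop : line.toList.drop prev.toNat
        = line.toList[prev.toNat] :: line.toList.drop (prev.toNat + 1) :=
      List.drop_eq_getElem_cons hprevlen
    have hget : PySem.List.pyGet? line.toList prev = some line.toList[prev.toNat] := by
      rw [PySem.List.pyGet?_of_nonneg line.toList (by omega)]
      exact List.getElem?_eq_getElem hprevlen
    set c := line.toList[prev.toNat] with hc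
    have hregion : (line.toList.drop prev.toNat).take (e - prev).toNat
        = c :: (line.toList.drop (prev+1).toNat).take (e - (prev+1)).toNat := by
      have h1 : (prev + 1).toNat = prev.toNat + 1 := by omega
      have h2 : (e - prev).toNat = (e - (prev+1)).toNat + 1 := by omega
      rw [hdrop, h2, List.take_succ_cons, h1]
    rw [PySem.List.pyRange_one_cons hlt, List.filter_cons]
    by_cases hmatch : String.ofList [c] = delimiter
    · have hpred : ((PySem.Str.pyGet? line prev).map (fun c => String.ofList [c]) == some delimiter) = true := by
        simp [PySem.Str.pyGet?_eq, PySem.Chars.pyGet?_eq_listPyGet?, hget, hmatch]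
      rw [if_pos hpred]
      simp only [List.foldl_cons]
      rw [ih (prev+1) (prev+1) (out ++ [PySem.Str.slice line (some s) (some prev)])
        (by omega) (by omega) (by omega) (by omega)]
      rw [hregion]
      simp only [segs, if_pos hmatch]
      have hslice : PySem.Str.slice line (some s) (some prev)
          = String.ofList ((line.toList.drop s.toNat).take (prev - s).toNat) := by
        have h3 : (prev - s).toNat = prev.toNat - s.toNat := by omega
        show String.ofList (PySem.Chars.slice line.toList (some s) (some prev)) = _
        rw [PySem.Chars.slice_eq_listSlice, PySem.List.slice_toNat _ hs (by omega), h3]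
      simp [hslice]
    · have hpred : ¬ (((PySem.Str.pyGet? line prev).map (fun c => String.ofList [c]) == some delimiter) = true) := by
        simp [PySem.Str.pyGet?_eq, PySem.Chars.pyGet?_eq_listPyGet?, hget, hmatch]
      rw [if_neg hpred]
      rw [ih (prev+1) s out (by omega) hs (by omega) (by omega)]
      rw [hregion]
      simp only [segs, if_neg hmatch]
      have h1 : (prev + 1 - s).toNat = (prev - s).toNat + 1 := by omega
      have h2 : (line.toList.drop s.toNat)[(prev - s).toNat]? = some c := by
        rw [List.getElem?_drop]
        have hsn : s.toNat + (prev - s).toNat = prev.toNat := by omega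
        rw [hsn]
        exact List.getElem?_eq_getElem hprevlen
      rw [h1, List.take_add_one, h2]
      simp


-- ===== VERDICT (by name: the statement is the Claim_ definition above) =====
theorem spliter_spec : Claim_equal_spliter := by
  intro line delimiter _
  unfold Spec_spliter spliter spliter_alt
  by_cases hd : delimiter = "\n"
  · rw [if_pos hd]
    rw [foldl_positions line delimiter (line.toList.length : Int) (le_refl _)
      ((line.toList.length : Int) - 0).toNat 0 0 [] rfl (by omega) (by omega) (by omega)]
    rw [hd, spliterGo_newline]
    simp only [List.nil_append, List.drop_zero, sub_zero, Int.toNat_natCast,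
      List.take_length, Int.toNat_zero, List.take_zero]
  · rw [if_neg hd]
    set e : Int := (((line.toList.findIdx? (fun c => c == '\n')).getD line.toList.length : Nat) : Int) with he
    have hee : e ≤ (line.toList.length : Int) := by
      rw [he]
      cases hfi : line.toList.findIdx? (fun c => c == '\n') with
      | none => simp
      | some i =>
        have hi := List.findIdx?_eq_some_iff_findIdx_eq.mp hfi
        simp only [Option.getD_some]
        exact_mod_cast le_of_lt hi.1
    have he0 : 0 ≤ e := by rw [he]; exact Int.natCast_nonneg _
    rw [foldl_positions line delimiter e hee (e - 0).toNat 0 0 [] rfl (by omega) (by omega) he0]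
    rw [spliterGo_ne_newline delimiter hd, takeWhile_eq_take_findIdx?]
    rw [he]
    simp
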